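-- pv_equiv track=rewrite | github.com/divadnebnahtan/ling30015-final-research-project | old/data_generation_old.py | shortest_tree_distance_conllu
-- ===== SOURCE A (Python) =====
-- from collections import Counter, defaultdict, deque
--
-- def shortest_tree_distance_conllu(sentence, src_id, tgt_id):
--     adj = defaultdict(list)
--
--     for token in sentence:
--         tid = token.get("id")
--         head = token.get("head", 0)
--         if head and head != 0:
--             adj[tid].append(head)
--             adj[head].append(tid)
--
--     # BFS
--     queue = deque([(src_id, 0)])
--     seen = {src_id}
--
--     while queue:
--         node, dist = queue.popleft()
--         if node == tgt_id:
--             return dist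
--         for neighbor in adj.get(node, []):
--             if neighbor not in seen:
--                 seen.add(neighbor)
--                 queue.append((neighbor, dist + 1))
--
--     return max(len(sentence), abs(src_id - tgt_id))
-- ===== SOURCE B (Python) =====
-- def shortest_tree_distance_conllu(sentence, src_id, tgt_id):
--     # Bellman-Ford-style synchronous relaxation over the raw edge list:
--     # no adjacency index, no queue, no visited set.  dist maps a node to its
--     # shortest distance from src_id; each round relaxes every (id, head) edge
--     # in both directions against the previous round's snapshot.
--     edges = []
--     for token in sentence:
--         tid = token.get("id")
--         head = token.get("head", 0)
--         if head and head != 0: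
--             edges.append((tid, head))
--     dist = {src_id: 0}
--     for _ in range(2 * len(edges) + 2):
--         if tgt_id in dist:
--             return dist[tgt_id]
--         prev, changed = dist, False
--         new = dict(prev)
--         for u, v in edges:
--             for a, b in ((u, v), (v, u)):
--                 if a in prev:
--                     nd = prev[a] + 1
--                     if b not in new or nd < new[b]:
--                         new[b] = nd
--                         changed = True
--         if not changed:
--             break
--         dist = new
--     return max(len(sentence), abs(src_id - tgt_id))
-- ===== Notes on version B (the rewrite author's own statement) =====
-- stated objective: alternative
-- what changed: Replaces A's adjacency-dict construction plus queue-and-visited-set BFS by Bellman-Ford-style rounds of synchronous relaxation over the raw (id, head) edge list: a distance dictionary seeded with {src_id: 0} is relaxed against its previous snapshot once per round (both edge directions), stopping when tgt_id acquires a distance or a round changes nothing.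
import Mathlib
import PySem

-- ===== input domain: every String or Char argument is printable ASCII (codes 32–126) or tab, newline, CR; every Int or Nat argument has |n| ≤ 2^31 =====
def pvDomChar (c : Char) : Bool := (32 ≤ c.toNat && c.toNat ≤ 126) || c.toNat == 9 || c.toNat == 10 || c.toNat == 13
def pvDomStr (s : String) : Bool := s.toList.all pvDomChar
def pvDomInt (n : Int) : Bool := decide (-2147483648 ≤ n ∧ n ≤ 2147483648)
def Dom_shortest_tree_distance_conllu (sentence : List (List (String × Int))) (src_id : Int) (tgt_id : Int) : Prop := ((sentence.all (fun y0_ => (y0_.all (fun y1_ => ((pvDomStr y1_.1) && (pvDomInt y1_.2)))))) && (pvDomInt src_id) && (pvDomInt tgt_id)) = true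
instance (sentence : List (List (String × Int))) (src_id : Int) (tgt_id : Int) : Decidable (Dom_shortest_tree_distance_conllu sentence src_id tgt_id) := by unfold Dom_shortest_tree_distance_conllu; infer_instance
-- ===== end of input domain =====

-- B replaces A's adjacency-dict BFS (queue + visited set) by Bellman-Ford-style
-- rounds of synchronous relaxation over the raw (id, head) edge list
-- (objective: alternative — a different algorithm, not claimed faster).

-- ===== PORT A =====
-- Python tokens are dicts; token.get("id") may be None, and graph nodes mix ints
-- with None, so nodes are `Option Int` (none = Python None, some n = int n).
-- A's `while queue:` loop is ported with a fuel counter that is a pure totality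
-- guard: one unit per pop, and pops are bounded by 1 + total adjacency entries.
def pvAdjA (sentence : List (List (String × Int))) : PySem.Dict (Option Int) (List (Option Int)) :=
  sentence.foldl (fun adj token =>
    let tid := (PySem.Dict.mk token).get? "id"
    let head := (PySem.Dict.mk token).getD "head" 0
    if head ≠ 0 then
      let a1 := adj.insert tid (adj.getD tid [] ++ [some head])
      a1.insert (some head) (a1.getD (some head) [] ++ [tid])
    else adj) (PySem.Dict.mk [])

-- the inner `for neighbor in adj.get(node, [])` loop of A's BFS
def pvPushA (adj : PySem.Dict (Option Int) (List (Option Int))) (dist : Int) (node : Option Int)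
    (st : List (Option Int × Int) × PySem.Set (Option Int)) : List (Option Int × Int) × PySem.Set (Option Int) :=
  (adj.getD node []).foldl
    (fun p nb => if nb ∈ p.2 then p else (p.1 ++ [(nb, dist + 1)], PySem.Set.add p.2 nb)) st

def pvBfsA (adj : PySem.Dict (Option Int) (List (Option Int))) (tgt : Option Int) (fb : Int) :
    Nat → List (Option Int × Int) → PySem.Set (Option Int) → Int
  | _, [], _ => fb
  | 0, _ :: _, _ => fb
  | n + 1, (node, dist) :: rest, seen =>
      if node = tgt then dist
      else
        let st := pvPushA adj dist node (rest, seen)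
        pvBfsA adj tgt fb n st.1 st.2

def shortest_tree_distance_conllu (sentence : List (List (String × Int))) (src_id : Int) (tgt_id : Int) : Int :=
  let adj := pvAdjA sentence
  pvBfsA adj (some tgt_id) (max (sentence.length : Int) |src_id - tgt_id|)
    (adj.values.flatten.length + 1) [(some src_id, 0)] (PySem.Set.ofList [some src_id])

-- ===== PORT B =====
-- the edge-list pass of Source B
def pvEdges (sentence : List (List (String × Int))) : List (Option Int × Int) :=
  sentence.foldl (fun es token =>
    let tid := (PySem.Dict.mk token).get? "id"
    let head := (PySem.Dict.mk token).getD "head" 0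
    if head ≠ 0 then es ++ [(tid, head)] else es) []

-- one relaxation attempt `if a in prev: nd = prev[a]+1; if b not in new or nd < new[b]: new[b] = nd; changed = True`
def pvStep (prev : PySem.Dict (Option Int) Int) (st : PySem.Dict (Option Int) Int × Bool)
    (a b : Option Int) : PySem.Dict (Option Int) Int × Bool :=
  match prev.get? a with
  | none => st
  | some pa =>
      match st.1.get? b with
      | none => (st.1.insert b (pa + 1), true)
      | some nb => if pa + 1 < nb then (st.1.insert b (pa + 1), true) else st

-- one round: `new = dict(prev); for u, v in edges: for a, b in ((u,v),(v,u)): …`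
def pvRound (edges : List (Option Int × Int)) (prev : PySem.Dict (Option Int) Int) :
    PySem.Dict (Option Int) Int × Bool :=
  edges.foldl (fun st e =>
    [(e.1, some e.2), (some e.2, e.1)].foldl (fun st' p => pvStep prev st' p.1 p.2) st)
    (prev, false)

-- `for _ in range(2*len(edges)+2): if tgt in dist: return dist[tgt]; …; if not changed: break`
def pvRelax (edges : List (Option Int × Int)) (tgt : Option Int) (fb : Int) :
    Nat → PySem.Dict (Option Int) Int → Int
  | 0, _ => fb
  | m + 1, dist =>
      match dist.get? tgt with
      | some v => v
      | none =>
          let r := pvRound edges dist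
          if r.2 then pvRelax edges tgt fb m r.1 else fb

def shortest_tree_distance_conllu_alt (sentence : List (List (String × Int))) (src_id : Int) (tgt_id : Int) : Int :=
  let edges := pvEdges sentence
  pvRelax edges (some tgt_id) (max (sentence.length : Int) |src_id - tgt_id|)
    (2 * edges.length + 2) (PySem.Dict.mk [(some src_id, 0)])

-- ===== PRECONDITION & SPEC =====
def Spec_shortest_tree_distance_conllu (sentence : List (List (String × Int))) (src_id : Int) (tgt_id : Int) (out : Int) : Prop := out = shortest_tree_distance_conllu_alt sentence src_id tgt_id
instance (sentence : List (List (String × Int))) (src_id : Int) (tgt_id : Int) (out : Int) : Decidable (Spec_shortest_tree_distance_conllu sentence src_id tgt_id out) := by unfold Spec_shortest_tree_distance_conllu; infer_instance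

-- ===== CLAIM (what is proved, stated in full; the proofs are below) =====
def Claim_equal_shortest_tree_distance_conllu : Prop := ∀ (sentence : List (List (String × Int))) (src_id : Int) (tgt_id : Int), Dom_shortest_tree_distance_conllu sentence src_id tgt_id → Spec_shortest_tree_distance_conllu sentence src_id tgt_id (shortest_tree_distance_conllu sentence src_id tgt_id)

-- ===== LEMMAS AND PROOFS =====

-- ---- proof-side helpers ----

-- both directions of each edge, in sweep order
def pvDirs (edges : List (Option Int × Int)) : List (Option Int × Option Int) :=
  edges.flatMap (fun p => [(p.1, some p.2), (some p.2, p.1)])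

-- level-synchronous view of A's per-level queue processing (proof device only)
def pvExpandB (adj : PySem.Dict (Option Int) (List (Option Int)))
    (st : PySem.Set (Option Int) × List (Option Int)) (F : List (Option Int)) :
    PySem.Set (Option Int) × List (Option Int) :=
  F.foldl (fun p node =>
    (adj.getD node []).foldl
      (fun q nb => if nb ∈ q.1 then q else (PySem.Set.add q.1 nb, q.2 ++ [nb])) p) st

-- the loop invariant tying A's (seen, frontier) at level d to B's distance dict
def pvInv (edges : List (Option Int × Int)) (tgt : Option Int)
    (s : PySem.Set (Option Int)) (F : List (Option Int))
    (dist : PySem.Dict (Option Int) Int) (d : Int) : Prop :=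
  (∀ x, x ∈ s ↔ (dist.get? x).isSome) ∧
  (∀ x ∈ F, dist.get? x = some d) ∧
  (∀ x ∈ s, x ∉ F → ∃ j, dist.get? x = some j ∧ j < d) ∧
  (∀ p ∈ pvDirs edges, ∀ i, dist.get? p.1 = some i → i < d →
      ∃ j, dist.get? p.2 = some j ∧ j ≤ i + 1) ∧
  (tgt ∈ s → tgt ∈ F)

-- counting universe nodes not yet seen
def pvUnseen (U : List (Option Int)) (s : PySem.Set (Option Int)) : Nat :=
  (U.filter (fun v => decide (v ∉ s))).length

-- ---- A-side queue-shape lemmas ----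

theorem foldA_shift (d : Int) (l : List (Option Int)) (q : List (Option Int × Int)) (s : PySem.Set (Option Int)) :
    l.foldl (fun p nb => if nb ∈ p.2 then p else (p.1 ++ [(nb, d + 1)], PySem.Set.add p.2 nb)) (q, s) =
      (q ++ (l.foldl (fun p nb => if nb ∈ p.2 then p else (p.1 ++ [(nb, d + 1)], PySem.Set.add p.2 nb)) ([], s)).1,
       (l.foldl (fun p nb => if nb ∈ p.2 then p else (p.1 ++ [(nb, d + 1)], PySem.Set.add p.2 nb)) ([], s)).2) := by
  induction l generalizing q s with
  | nil => simp
  | cons nb l ih =>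
      simp only [List.foldl_cons]
      by_cases h : nb ∈ s
      · rw [if_pos h, if_pos h]; exact ih q s
      · rw [if_neg h, if_neg h]
        simp only [List.nil_append]
        rw [ih (q ++ [(nb, d + 1)]) (PySem.Set.add s nb), ih [(nb, d + 1)] (PySem.Set.add s nb)]
        simp [List.append_assoc]

theorem pushA_shift (adj : PySem.Dict (Option Int) (List (Option Int))) (d : Int) (node : Option Int)
    (q : List (Option Int × Int)) (s : PySem.Set (Option Int)) :
    pvPushA adj d node (q, s) =
      (q ++ (pvPushA adj d node ([], s)).1, (pvPushA adj d node ([], s)).2) := by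
  unfold pvPushA
  exact foldA_shift d (adj.getD node []) q s

theorem foldB_shift (l : List (Option Int))
    (s : PySem.Set (Option Int)) (acc : List (Option Int)) :
    l.foldl (fun q nb => if nb ∈ q.1 then q else (PySem.Set.add q.1 nb, q.2 ++ [nb])) (s, acc) =
      ((l.foldl (fun q nb => if nb ∈ q.1 then q else (PySem.Set.add q.1 nb, q.2 ++ [nb])) (s, [])).1,
       acc ++ (l.foldl (fun q nb => if nb ∈ q.1 then q else (PySem.Set.add q.1 nb, q.2 ++ [nb])) (s, [])).2) := by
  induction l generalizing s acc with
  | nil => simp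
  | cons nb l ih =>
      simp only [List.foldl_cons]
      by_cases h : nb ∈ s
      · rw [if_pos h, if_pos h]; exact ih s acc
      · rw [if_neg h, if_neg h]
        simp only [List.nil_append]
        rw [ih (PySem.Set.add s nb) (acc ++ [nb]), ih (PySem.Set.add s nb) [nb]]
        simp [List.append_assoc]

theorem expandB_shift (adj : PySem.Dict (Option Int) (List (Option Int))) (F : List (Option Int))
    (s : PySem.Set (Option Int)) (acc : List (Option Int)) :
    pvExpandB adj (s, acc) F =
      ((pvExpandB adj (s, []) F).1, acc ++ (pvExpandB adj (s, []) F).2) := by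
  unfold pvExpandB
  induction F generalizing s acc with
  | nil => simp
  | cons f F ih =>
      simp only [List.foldl_cons]
      rw [foldB_shift _ s acc, foldB_shift _ s []]
      rw [ih _ (acc ++ _), ih _ ([] ++ _)]
      simp

theorem expandB_cons (adj : PySem.Dict (Option Int) (List (Option Int))) (f : Option Int)
    (F : List (Option Int)) (st : PySem.Set (Option Int) × List (Option Int)) :
    pvExpandB adj st (f :: F) = pvExpandB adj (pvExpandB adj st [f]) F := by
  simp [pvExpandB]

-- what A pushes for one node is exactly the level expansion for it, tagged with dist+1
theorem foldAB (d : Int) (l : List (Option Int)) (s : PySem.Set (Option Int)) :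
    l.foldl (fun p nb => if nb ∈ p.2 then p else (p.1 ++ [(nb, d + 1)], PySem.Set.add p.2 nb)) ([], s) =
      (((l.foldl (fun q nb => if nb ∈ q.1 then q else (PySem.Set.add q.1 nb, q.2 ++ [nb])) (s, [])).2).map (fun v => (v, d + 1)),
       (l.foldl (fun q nb => if nb ∈ q.1 then q else (PySem.Set.add q.1 nb, q.2 ++ [nb])) (s, [])).1) := by
  induction l generalizing s with
  | nil => simp
  | cons nb l ih =>
      simp only [List.foldl_cons]
      by_cases h : nb ∈ s
      · rw [if_pos h, if_pos h]; exact ih s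
      · rw [if_neg h, if_neg h]
        simp only [List.nil_append]
        rw [foldA_shift d l [(nb, d + 1)] (PySem.Set.add s nb),
            foldB_shift l (PySem.Set.add s nb) [nb], ih (PySem.Set.add s nb)]
        simp

theorem pushA_expandB (adj : PySem.Dict (Option Int) (List (Option Int))) (d : Int)
    (node : Option Int) (s : PySem.Set (Option Int)) :
    pvPushA adj d node ([], s) =
      (((pvExpandB adj (s, []) [node]).2).map (fun v => (v, d + 1)), (pvExpandB adj (s, []) [node]).1) := by
  unfold pvPushA pvExpandB
  simp only [List.foldl_cons, List.foldl_nil]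
  exact foldAB d (adj.getD node []) s

-- ---- membership characterization of the level expansion ----

theorem mem_foldB_fst (l : List (Option Int)) (s : PySem.Set (Option Int)) (acc : List (Option Int)) (x : Option Int) :
    x ∈ (l.foldl (fun q nb => if nb ∈ q.1 then q else (PySem.Set.add q.1 nb, q.2 ++ [nb])) (s, acc)).1 ↔
      x ∈ s ∨ x ∈ l := by
  induction l generalizing s acc with
  | nil => simp
  | cons nb l ih =>
      simp only [List.foldl_cons]
      by_cases h : nb ∈ s
      · rw [if_pos h, ih]
        simp only [List.mem_cons]
        constructor
        · tauto
        · rintro (h1 | h1 | h1)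
          exacts [Or.inl h1, Or.inl (h1 ▸ h), Or.inr h1]
      · rw [if_neg h, ih]
        simp only [PySem.Set.mem_add, List.mem_cons]
        tauto

theorem mem_foldB_snd (l : List (Option Int)) (s : PySem.Set (Option Int)) (acc : List (Option Int)) (x : Option Int) :
    x ∈ (l.foldl (fun q nb => if nb ∈ q.1 then q else (PySem.Set.add q.1 nb, q.2 ++ [nb])) (s, acc)).2 ↔
      x ∈ acc ∨ (x ∈ l ∧ x ∉ s) := by
  induction l generalizing s acc with
  | nil => simp
  | cons nb l ih =>
      simp only [List.foldl_cons]
      by_cases h : nb ∈ s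
      · rw [if_pos h, ih]
        simp only [List.mem_cons]
        by_cases hx : x = nb
        · subst hx; simp [h]
        · tauto
      · rw [if_neg h, ih]
        simp only [List.mem_append, List.mem_cons, PySem.Set.mem_add]
        by_cases hx : x = nb
        · subst hx; simp [h]
        · simp only [hx, or_false, false_or]
          tauto

theorem mem_expand_fst (adj : PySem.Dict (Option Int) (List (Option Int))) (F : List (Option Int))
    (s : PySem.Set (Option Int)) (acc : List (Option Int)) (x : Option Int) :
    x ∈ (pvExpandB adj (s, acc) F).1 ↔ x ∈ s ∨ ∃ a ∈ F, x ∈ adj.getD a [] := by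
  induction F generalizing s acc with
  | nil => simp [pvExpandB]
  | cons f F ih =>
      unfold pvExpandB
      simp only [List.foldl_cons]
      rcases hst : (adj.getD f []).foldl
          (fun q nb => if nb ∈ q.1 then q else (PySem.Set.add q.1 nb, q.2 ++ [nb])) (s, acc) with ⟨s1, a1⟩
      have h1 : x ∈ s1 ↔ x ∈ s ∨ x ∈ adj.getD f [] := by
        have := mem_foldB_fst (adj.getD f []) s acc x
        rw [hst] at this; exact this
      have := ih s1 a1
      unfold pvExpandB at this
      rw [this, h1]
      simp only [List.mem_cons]
      constructor
      · rintro ((h2 | h2) | ⟨a, ha, h2⟩)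
        · exact Or.inl h2
        · exact Or.inr ⟨f, Or.inl rfl, h2⟩
        · exact Or.inr ⟨a, Or.inr ha, h2⟩
      · rintro (h2 | ⟨a, (ha | ha), h2⟩)
        · exact Or.inl (Or.inl h2)
        · exact Or.inl (Or.inr (ha ▸ h2))
        · exact Or.inr ⟨a, ha, h2⟩

theorem mem_expand_snd (adj : PySem.Dict (Option Int) (List (Option Int))) (F : List (Option Int))
    (s : PySem.Set (Option Int)) (acc : List (Option Int)) (x : Option Int) :
    x ∈ (pvExpandB adj (s, acc) F).2 ↔ x ∈ acc ∨ ((∃ a ∈ F, x ∈ adj.getD a []) ∧ x ∉ s) := by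
  induction F generalizing s acc with
  | nil => simp [pvExpandB]
  | cons f F ih =>
      unfold pvExpandB
      simp only [List.foldl_cons]
      rcases hst : (adj.getD f []).foldl
          (fun q nb => if nb ∈ q.1 then q else (PySem.Set.add q.1 nb, q.2 ++ [nb])) (s, acc) with ⟨s1, a1⟩
      have h1 : x ∈ s1 ↔ x ∈ s ∨ x ∈ adj.getD f [] := by
        have := mem_foldB_fst (adj.getD f []) s acc x
        rw [hst] at this; exact this
      have h2 : x ∈ a1 ↔ x ∈ acc ∨ (x ∈ adj.getD f [] ∧ x ∉ s) := by
        have := mem_foldB_snd (adj.getD f []) s acc x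
        rw [hst] at this; exact this
      have := ih s1 a1
      unfold pvExpandB at this
      rw [this, h1, h2]
      simp only [List.mem_cons]
      constructor
      · rintro ((h | h) | ⟨⟨a, ha, hx3⟩, h4⟩)
        · exact Or.inl h
        · exact Or.inr ⟨⟨f, Or.inl rfl, h.1⟩, h.2⟩
        · exact Or.inr ⟨⟨a, Or.inr ha, hx3⟩, fun hsx => h4 (Or.inl hsx)⟩
      · rintro (h | ⟨⟨a, (rfl | ha), hx3⟩, h4⟩)
        · exact Or.inl (Or.inl h)
        · exact Or.inl (Or.inr ⟨hx3, h4⟩)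
        · by_cases hf : x ∈ adj.getD f []
          · exact Or.inl (Or.inr ⟨hf, h4⟩)
          · exact Or.inr ⟨⟨a, ha, hx3⟩, fun hc => hc.elim h4 hf⟩
-- ---- adjacency dict ↔ edge-direction list ----

theorem adjA_token_mem (adj : PySem.Dict (Option Int) (List (Option Int)))
    (tid : Option Int) (head : Int) (u x : Option Int) :
    x ∈ ((adj.insert tid (adj.getD tid [] ++ [some head])).insert (some head)
          ((adj.insert tid (adj.getD tid [] ++ [some head])).getD (some head) [] ++ [tid])).getD u [] ↔
      x ∈ adj.getD u [] ∨ (u = tid ∧ x = some head) ∨ (u = some head ∧ x = tid) := by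
  rw [PySem.Dict.getD_insert, PySem.Dict.getD_insert]
  by_cases h1 : u = some head <;> by_cases h2 : u = tid <;>
    by_cases h3 : (some head : Option Int) = tid <;>
      simp_all [List.mem_append, PySem.Dict.getD_insert]

theorem pvDirs_append (e1 e2 : List (Option Int × Int)) :
    pvDirs (e1 ++ e2) = pvDirs e1 ++ pvDirs e2 := by
  simp [pvDirs]

theorem pvDirs_length (es : List (Option Int × Int)) :
    (pvDirs es).length = 2 * es.length := by
  induction es with
  | nil => simp [pvDirs]
  | cons e es ih => simp [pvDirs] at ih ⊢; omega

theorem pvEdges_from (l : List (List (String × Int))) :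
    ∀ es : List (Option Int × Int),
    l.foldl (fun es token =>
      let tid := (PySem.Dict.mk token).get? "id"
      let head := (PySem.Dict.mk token).getD "head" 0
      if head ≠ 0 then es ++ [(tid, head)] else es) es =
    es ++ l.foldl (fun es token =>
      let tid := (PySem.Dict.mk token).get? "id"
      let head := (PySem.Dict.mk token).getD "head" 0
      if head ≠ 0 then es ++ [(tid, head)] else es) [] := by
  induction l with
  | nil => simp
  | cons t rest ih =>
      intro es
      simp only [List.foldl_cons]
      by_cases hh : (PySem.Dict.mk t).getD "head" 0 ≠ 0
      · simp only [if_pos hh]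
        rw [ih (es ++ _), ih ([] ++ _)]
        simp
      · simp only [if_neg hh]
        exact ih es

theorem adjA_fold_mem (sentence : List (List (String × Int))) :
    ∀ (adj : PySem.Dict (Option Int) (List (Option Int))) (u x : Option Int),
      x ∈ (sentence.foldl (fun adj token =>
            let tid := (PySem.Dict.mk token).get? "id"
            let head := (PySem.Dict.mk token).getD "head" 0
            if head ≠ 0 then
              let a1 := adj.insert tid (adj.getD tid [] ++ [some head])
              a1.insert (some head) (a1.getD (some head) [] ++ [tid])
            else adj) adj).getD u [] ↔
        x ∈ adj.getD u [] ∨ (u, x) ∈ pvDirs (pvEdges sentence) := by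
  induction sentence with
  | nil =>
      intro adj u x
      simp [pvEdges, pvDirs]
  | cons t rest ih =>
      intro adj u x
      simp only [List.foldl_cons]
      have hE : pvEdges (t :: rest) =
          (if (PySem.Dict.mk t).getD "head" 0 ≠ 0
            then [((PySem.Dict.mk t).get? "id", (PySem.Dict.mk t).getD "head" 0)] else []) ++ pvEdges rest := by
        unfold pvEdges
        simp only [List.foldl_cons]
        by_cases hh : (PySem.Dict.mk t).getD "head" 0 ≠ 0
        · simp only [if_pos hh]
          rw [pvEdges_from rest ([] ++ _)]
          simp
        · simp only [if_neg hh]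
          simp
      by_cases hh : (PySem.Dict.mk t).getD "head" 0 ≠ 0
      · simp only [if_pos hh] at hE ⊢
        rw [ih, adjA_token_mem, hE, pvDirs_append]
        simp only [List.mem_append, pvDirs, List.flatMap_cons, List.flatMap_nil, List.append_nil,
          List.mem_cons, Prod.mk.injEq, List.not_mem_nil, or_false]
        tauto
      · simp only [if_neg hh] at hE ⊢
        rw [ih, hE]
        simp

theorem mem_adjA_iff (sentence : List (List (String × Int))) (u x : Option Int) :
    x ∈ (pvAdjA sentence).getD u [] ↔ (u, x) ∈ pvDirs (pvEdges sentence) := by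
  rw [pvAdjA, adjA_fold_mem]
  have h0 : (PySem.Dict.mk ([] : List (Option Int × List (Option Int)))).getD u [] = [] := rfl
  rw [h0]
  simp

-- ---- unseen-counting lemmas ----

theorem pvFilterAux (s : PySem.Set (Option Int)) (v : Option Int) (hv : v ∉ s) :
    ∀ U : List (Option Int), U.Nodup → v ∈ U →
      (U.filter (fun x => decide (x ∉ s) && decide (x ≠ v))).length + 1 =
        (U.filter (fun x => decide (x ∉ s))).length := by
  intro U
  induction U with
  | nil => intro _ h; cases h
  | cons u U ih =>
      intro hnd hU
      rw [List.filter_cons, List.filter_cons]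
      by_cases huv : u = v
      · subst huv
        have hvU : u ∉ U := (List.nodup_cons.mp hnd).1
        have htail : U.filter (fun x => decide (x ∉ s) && decide (x ≠ u)) = U.filter (fun x => decide (x ∉ s)) := by
          apply List.filter_congr
          intro x hx
          have hxu : x ≠ u := fun h => hvU (h ▸ hx)
          simp [hxu]
        rw [htail]
        simp [hv]
      · have hU' : v ∈ U := by
          rcases List.mem_cons.mp hU with h | h
          · exact absurd h.symm huv
          · exact h
        have ih' := ih (List.nodup_cons.mp hnd).2 hU'
        by_cases hus : u ∈ s
        · have hn : (decide (u ∉ s) && decide (u ≠ v)) = false := by simp [hus]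
          have ho : (decide (u ∉ s)) = false := by simp [hus]
          rw [hn, ho, if_neg (by simp), if_neg (by simp)]
          exact ih'
        · have hn : (decide (u ∉ s) && decide (u ≠ v)) = true := by simp [hus, huv]
          have ho : (decide (u ∉ s)) = true := by simp [hus]
          rw [hn, ho, if_pos rfl, if_pos rfl]
          simp only [List.length_cons]
          omega

theorem pvUnseen_add (U : List (Option Int)) (s : PySem.Set (Option Int)) (v : Option Int)
    (hnd : U.Nodup) (hU : v ∈ U) (hv : v ∉ s) :
    pvUnseen U (PySem.Set.add s v) + 1 = pvUnseen U s := by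
  unfold pvUnseen
  rw [PySem.Set.add_of_not_mem hv]
  have hpred : ∀ x : Option Int, (decide (x ∉ s ++ [v])) = (decide (x ∉ s) && decide (x ≠ v)) := by
    intro x
    by_cases h1 : x ∈ s <;> by_cases h2 : x = v <;> simp [h1, h2]
  simp only [hpred]
  exact pvFilterAux s v hv U hnd hU

theorem pvUnseen_le (U : List (Option Int)) (s : PySem.Set (Option Int)) :
    pvUnseen U s ≤ U.length := List.length_filter_le _ _

theorem foldB_unseen (U : List (Option Int)) (hnd : U.Nodup)
    (l : List (Option Int)) (hl : ∀ x ∈ l, x ∈ U) (s : PySem.Set (Option Int)) (acc : List (Option Int)) :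
    pvUnseen U ((l.foldl (fun q nb => if nb ∈ q.1 then q else (PySem.Set.add q.1 nb, q.2 ++ [nb])) (s, acc)).1)
      + ((l.foldl (fun q nb => if nb ∈ q.1 then q else (PySem.Set.add q.1 nb, q.2 ++ [nb])) (s, acc)).2).length
      = pvUnseen U s + acc.length := by
  induction l generalizing s acc with
  | nil => simp
  | cons nb l ih =>
      simp only [List.foldl_cons]
      by_cases h : nb ∈ s
      · simpa [h] using ih (fun x hx => hl x (List.mem_cons_of_mem _ hx)) s acc
      · simp only [h, if_false]
        have := ih (fun x hx => hl x (List.mem_cons_of_mem _ hx)) (PySem.Set.add s nb) (acc ++ [nb])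
        have hadd := pvUnseen_add U s nb hnd (hl nb List.mem_cons_self) h
        simp at this
        omega

theorem expandB_unseen (U : List (Option Int)) (hnd : U.Nodup)
    (adj : PySem.Dict (Option Int) (List (Option Int)))
    (hadj : ∀ node, ∀ nb ∈ adj.getD node [], nb ∈ U)
    (F : List (Option Int)) (s : PySem.Set (Option Int)) (acc : List (Option Int)) :
    pvUnseen U ((pvExpandB adj (s, acc) F).1) + ((pvExpandB adj (s, acc) F).2).length
      = pvUnseen U s + acc.length := by
  unfold pvExpandB
  induction F generalizing s acc with
  | nil => simp
  | cons f F ih =>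
      simp only [List.foldl_cons]
      have h1 := foldB_unseen U hnd (adj.getD f []) (hadj f) s acc
      rcases hst : (adj.getD f []).foldl (fun q nb => if nb ∈ q.1 then q else (PySem.Set.add q.1 nb, q.2 ++ [nb])) (s, acc) with ⟨s1, a1⟩
      simp only [hst] at h1 ⊢
      have h2 := ih s1 a1
      omega

-- ---- A-side level consumption ----

theorem consumeFound (adj : PySem.Dict (Option Int) (List (Option Int))) (tgt : Option Int) (fb : Int)
    (d : Int) (F : List (Option Int)) (q : List (Option Int × Int)) (s : PySem.Set (Option Int)) (m : Nat)
    (hF : tgt ∈ F) :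
    pvBfsA adj tgt fb (F.length + m) (F.map (fun v => (v, d)) ++ q) s = d := by
  revert hF
  induction F generalizing q s with
  | nil => intro h; cases h
  | cons f F ih =>
      intro hF
      have hlen : (f :: F).length + m = (F.length + m) + 1 := by simp; omega
      rw [hlen]
      simp only [List.map_cons, List.cons_append, pvBfsA]
      by_cases hf : f = tgt
      · simp [hf]
      · rcases List.mem_cons.mp hF with h | h
        · exact absurd h.symm hf
        · rw [if_neg hf]
          show pvBfsA adj tgt fb (F.length + m) (pvPushA adj d f (F.map (fun v => (v, d)) ++ q, s)).1 (pvPushA adj d f (F.map (fun v => (v, d)) ++ q, s)).2 = d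
          rw [pushA_shift]
          simp only [List.append_assoc]
          exact ih (q ++ (pvPushA adj d f ([], s)).1) (pvPushA adj d f ([], s)).2 h

theorem consume (adj : PySem.Dict (Option Int) (List (Option Int))) (tgt : Option Int) (fb : Int)
    (d : Int) (F : List (Option Int)) (q : List (Option Int × Int)) (s : PySem.Set (Option Int)) (m : Nat)
    (hF : tgt ∉ F) :
    pvBfsA adj tgt fb (F.length + m) (F.map (fun v => (v, d)) ++ q) s =
      pvBfsA adj tgt fb m (q ++ ((pvExpandB adj (s, []) F).2).map (fun v => (v, d + 1)))
        (pvExpandB adj (s, []) F).1 := by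
  revert hF
  induction F generalizing q s with
  | nil => intro _; simp [pvExpandB]
  | cons f F ih =>
      intro hF
      have hlen : (f :: F).length + m = (F.length + m) + 1 := by simp; omega
      rw [hlen]
      simp only [List.map_cons, List.cons_append, pvBfsA]
      have hf : ¬ f = tgt := fun h => hF (by simp [h])
      rw [if_neg hf]
      show pvBfsA adj tgt fb (F.length + m) (pvPushA adj d f (F.map (fun v => (v, d)) ++ q, s)).1 (pvPushA adj d f (F.map (fun v => (v, d)) ++ q, s)).2 = _
      rw [pushA_shift, pushA_expandB]
      have hF' : tgt ∉ F := fun h => hF (List.mem_cons_of_mem _ h)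
      simp only [List.append_assoc]
      rw [ih (q ++ ((pvExpandB adj (s, []) [f]).2).map (fun v => (v, d + 1))) (pvExpandB adj (s, []) [f]).1 hF']
      rw [expandB_cons adj f F (s, [])]
      rcases hE : pvExpandB adj (s, []) [f] with ⟨s1, a1⟩
      rw [expandB_shift adj F s1 a1]
      simp [List.append_assoc]

-- ---- B-side round characterization ----

theorem round_eq_dirs (edges : List (Option Int × Int)) (prev : PySem.Dict (Option Int) Int) :
    pvRound edges prev = (pvDirs edges).foldl (fun st p => pvStep prev st p.1 p.2) (prev, false) := by
  unfold pvRound pvDirs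
  generalize (prev, false) = st0
  induction edges generalizing st0 with
  | nil => simp
  | cons e es ih =>
      simp only [List.flatMap_cons, List.foldl_cons, List.foldl_append, List.foldl_nil]
      exact ih _

-- one relaxation attempt, under the invariant hypotheses
theorem stepChar (dist : PySem.Dict (Option Int) Int) (d : Int)
    (Hle : ∀ x i, dist.get? x = some i → i ≤ d)
    (p : Option Int × Option Int)
    (Hcl : ∀ i, dist.get? p.1 = some i → i < d → ∃ j, dist.get? p.2 = some j ∧ j ≤ i + 1)
    (st : PySem.Dict (Option Int) Int × Bool)
    (M1 : ∀ x i, dist.get? x = some i → st.1.get? x = some i)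
    (M2 : ∀ x, dist.get? x = none → st.1.get? x = none ∨ st.1.get? x = some (d + 1))
    (M3 : st.2 = false → ∀ x, dist.get? x = none → st.1.get? x = none) :
    (∀ x i, dist.get? x = some i → (pvStep dist st p.1 p.2).1.get? x = some i) ∧
    (∀ x, dist.get? x = none → (pvStep dist st p.1 p.2).1.get? x = none ∨ (pvStep dist st p.1 p.2).1.get? x = some (d + 1)) ∧
    ((pvStep dist st p.1 p.2).2 = false → ∀ x, dist.get? x = none → (pvStep dist st p.1 p.2).1.get? x = none) ∧
    (∀ x, dist.get? x = none →
      ((pvStep dist st p.1 p.2).1.get? x = some (d + 1) ↔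
        st.1.get? x = some (d + 1) ∨ (p.2 = x ∧ dist.get? p.1 = some d))) ∧
    ((pvStep dist st p.1 p.2).2 = true ↔
      st.2 = true ∨ (dist.get? p.2 = none ∧ dist.get? p.1 = some d)) := by
  cases ha : dist.get? p.1 with
  | none =>
      have hstep : pvStep dist st p.1 p.2 = st := by simp [pvStep, ha]
      rw [hstep]
      refine ⟨M1, M2, M3, ?_, ?_⟩
      · intro x hx; simp
      · simp
  | some pa =>
      have hpa_le : pa ≤ d := Hle _ _ ha
      cases hb : st.1.get? p.2 with
      | none =>
          have hdb : dist.get? p.2 = none := by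
            cases hdb : dist.get? p.2 with
            | none => rfl
            | some j => exact absurd (M1 _ _ hdb) (by simp [hb])
          have hpad : pa = d := by
            by_contra hne
            obtain ⟨j, hj, _⟩ := Hcl pa ha (lt_of_le_of_ne hpa_le hne)
            exact absurd hj (by simp [hdb])
          subst hpad
          have hstep : pvStep dist st p.1 p.2 = (st.1.insert p.2 (pa + 1), true) := by
            simp [pvStep, ha, hb]
          rw [hstep]
          refine ⟨?_, ?_, ?_, ?_, ?_⟩
          · intro x i hx
            have hxb : x ≠ p.2 := fun h => by simp [h ▸ hx] at hdb
            rw [PySem.Dict.get?_insert_of_ne _ _ hxb]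
            exact M1 _ _ hx
          · intro x hx
            by_cases hxb : x = p.2
            · subst hxb; rw [PySem.Dict.get?_insert_self]; right; rfl
            · rw [PySem.Dict.get?_insert_of_ne _ _ hxb]; exact M2 _ hx
          · intro h; cases h
          · intro x hx
            by_cases hxb : x = p.2
            · subst hxb
              rw [PySem.Dict.get?_insert_self]
              simp
            · rw [PySem.Dict.get?_insert_of_ne _ _ hxb]
              constructor
              · exact Or.inl
              · rintro (h | ⟨h1, h2⟩)
                · exact h
                · exact absurd h1 (fun h => hxb h.symm)
          · simp [hdb]
      | some nb =>
          have hnowrite : ¬ (pa + 1 < nb) := by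
            cases hdb : dist.get? p.2 with
            | some j =>
                have hmj := M1 _ _ hdb
                rw [hb] at hmj
                have hnbj : nb = j := by injection hmj
                subst hnbj
                by_cases hlt : pa < d
                · obtain ⟨j', hj', hle'⟩ := Hcl pa ha hlt
                  rw [hdb] at hj'
                  have : nb = j' := by injection hj'
                  omega
                · have h1 : pa = d := le_antisymm hpa_le (not_lt.mp hlt)
                  have h2 := Hle _ _ hdb
                  omega
            | none =>
                rcases M2 _ hdb with h | h
                · rw [hb] at h; cases h
                · rw [hb] at h
                  have hnbd : nb = d + 1 := by injection h
                  by_cases hlt : pa < d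
                  · obtain ⟨j', hj', _⟩ := Hcl pa ha hlt
                    simp [hdb] at hj'
                  · have : pa = d := le_antisymm hpa_le (not_lt.mp hlt)
                    omega
          have hstep : pvStep dist st p.1 p.2 = st := by
            simp [pvStep, ha, hb, if_neg hnowrite]
          rw [hstep]
          refine ⟨M1, M2, M3, ?_, ?_⟩
          · intro x hx
            constructor
            · exact Or.inl
            · rintro (h | ⟨h1, h2⟩)
              · exact h
              · subst h1
                rcases M2 _ hx with h | h
                · rw [hb] at h; cases h
                · exact h
          · constructor
            · exact Or.inl
            · rintro (h | ⟨h1, h2⟩)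
              · exact h
              · by_contra hfalse
                have hst2 : st.2 = false := by
                  cases hst2 : st.2
                  · rfl
                  · exact absurd hst2 hfalse
                have := M3 hst2 _ h1
                rw [hb] at this; cases this

theorem foldChar (dist : PySem.Dict (Option Int) Int) (d : Int)
    (Hle : ∀ x i, dist.get? x = some i → i ≤ d) :
    ∀ (l : List (Option Int × Option Int)),
      (∀ p ∈ l, ∀ i, dist.get? p.1 = some i → i < d → ∃ j, dist.get? p.2 = some j ∧ j ≤ i + 1) →
      ∀ (st : PySem.Dict (Option Int) Int × Bool),
      (∀ x i, dist.get? x = some i → st.1.get? x = some i) →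
      (∀ x, dist.get? x = none → st.1.get? x = none ∨ st.1.get? x = some (d + 1)) →
      (st.2 = false → ∀ x, dist.get? x = none → st.1.get? x = none) →
      (∀ x i, dist.get? x = some i → (l.foldl (fun st p => pvStep dist st p.1 p.2) st).1.get? x = some i) ∧
      (∀ x, dist.get? x = none →
        ((l.foldl (fun st p => pvStep dist st p.1 p.2) st).1.get? x = some (d + 1) ↔
          st.1.get? x = some (d + 1) ∨ ∃ p ∈ l, p.2 = x ∧ dist.get? p.1 = some d)) ∧
      (∀ x, dist.get? x = none → (l.foldl (fun st p => pvStep dist st p.1 p.2) st).1.get? x = none ∨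
          (l.foldl (fun st p => pvStep dist st p.1 p.2) st).1.get? x = some (d + 1)) ∧
      ((l.foldl (fun st p => pvStep dist st p.1 p.2) st).2 = true ↔
        st.2 = true ∨ ∃ p ∈ l, dist.get? p.2 = none ∧ dist.get? p.1 = some d) := by
  intro l
  induction l with
  | nil =>
      intro _ st M1 M2 M3
      refine ⟨M1, ?_, M2, ?_⟩ <;> simp
  | cons p l ih =>
      intro Hcl st M1 M2 M3
      have hs := stepChar dist d Hle p (Hcl p (List.mem_cons_self)) st M1 M2 M3
      obtain ⟨S1, S2, S3, S4, S5⟩ := hs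
      have hrec := ih (fun q hq => Hcl q (List.mem_cons_of_mem _ hq)) (pvStep dist st p.1 p.2) S1 S2 S3
      obtain ⟨C1, C2, C3, C4⟩ := hrec
      simp only [List.foldl_cons]
      refine ⟨C1, ?_, C3, ?_⟩
      · intro x hx
        rw [C2 x hx, S4 x hx]
        simp only [List.mem_cons]
        constructor
        · rintro ((h | h) | ⟨q, hq, h⟩)
          · exact Or.inl h
          · exact Or.inr ⟨p, Or.inl rfl, h⟩
          · exact Or.inr ⟨q, Or.inr hq, h⟩
        · rintro (h | ⟨q, (rfl | hq), h⟩)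
          · exact Or.inl (Or.inl h)
          · exact Or.inl (Or.inr h)
          · exact Or.inr ⟨q, hq, h⟩
      · rw [C4, S5]
        simp only [List.mem_cons]
        constructor
        · rintro ((h | h) | ⟨q, hq, h⟩)
          · exact Or.inl h
          · exact Or.inr ⟨p, Or.inl rfl, h⟩
          · exact Or.inr ⟨q, Or.inr hq, h⟩
        · rintro (h | ⟨q, (rfl | hq), h⟩)
          · exact Or.inl (Or.inl h)
          · exact Or.inl (Or.inr h)
          · exact Or.inr ⟨q, hq, h⟩

-- ---- the main simulation ----

theorem pvBfsA_nil (adj : PySem.Dict (Option Int) (List (Option Int))) (tgt : Option Int) (fb : Int)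
    (n : Nat) (s : PySem.Set (Option Int)) :
    pvBfsA adj tgt fb n [] s = fb := by
  cases n <;> rfl

theorem bridge (adj : PySem.Dict (Option Int) (List (Option Int)))
    (edges : List (Option Int × Int)) (tgt : Option Int) (fb : Int)
    (U : List (Option Int)) (hnd : U.Nodup)
    (hadj : ∀ node, ∀ nb ∈ adj.getD node [], nb ∈ U)
    (Hcorr : ∀ a x, x ∈ adj.getD a [] ↔ (a, x) ∈ pvDirs edges) :
    ∀ (m n : Nat) (F : List (Option Int)) (s : PySem.Set (Option Int))
      (dist : PySem.Dict (Option Int) Int) (d : Int),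
      pvInv edges tgt s F dist d →
      pvUnseen U s < m → F.length + pvUnseen U s ≤ n →
      pvBfsA adj tgt fb n (F.map (fun v => (v, d))) s = pvRelax edges tgt fb m dist := by
  intro m
  induction m with
  | zero => intro n F s dist d _ hm _; omega
  | succ m ih =>
      intro n F s dist d hInv hm hn
      obtain ⟨J1, J2, J3, J4, J5⟩ := hInv
      have Hle : ∀ x i, dist.get? x = some i → i ≤ d := by
        intro x i hx
        have hxs : x ∈ s := (J1 x).mpr (by simp [hx])
        by_cases hxF : x ∈ F
        · have h2 := J2 x hxF
          rw [hx] at h2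
          have : i = d := by injection h2
          omega
        · obtain ⟨j, hj, hjd⟩ := J3 x hxs hxF
          rw [hx] at hj
          have : i = j := by injection hj
          omega
      have Fchar : ∀ a, dist.get? a = some d ↔ a ∈ F := by
        intro a
        constructor
        · intro ha
          have has : a ∈ s := (J1 a).mpr (by simp [ha])
          by_contra haF
          obtain ⟨j, hj, hjd⟩ := J3 a has haF
          rw [ha] at hj
          have : d = j := by injection hj
          omega
        · exact J2 a
      -- the relaxation round, characterized
      have hfold := foldChar dist d Hle (pvDirs edges) J4 (dist, false)
        (fun _ _ h => h) (fun _ h => Or.inl h) (fun _ _ h => h)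
      rw [← round_eq_dirs] at hfold
      obtain ⟨K1, K2, K3, K4⟩ := hfold
      have K2' : ∀ x, dist.get? x = none →
          ((pvRound edges dist).1.get? x = some (d + 1) ↔
            ∃ p ∈ pvDirs edges, p.2 = x ∧ dist.get? p.1 = some d) := by
        intro x hx
        rw [K2 x hx, hx]
        simp
      have K4' : (pvRound edges dist).2 = true ↔
          ∃ p ∈ pvDirs edges, dist.get? p.2 = none ∧ dist.get? p.1 = some d := by
        rw [K4]
        simp
      match F with
      | [] =>
          -- empty frontier: A returns fb; B's round changes nothing, so B returns fb
          have htgt : dist.get? tgt = none := by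
            cases h : dist.get? tgt with
            | none => rfl
            | some v =>
                have : tgt ∈ s := (J1 tgt).mpr (by simp [h])
                exact absurd (J5 this) (List.not_mem_nil)
          have hch : (pvRound edges dist).2 = false := by
            rw [Bool.eq_false_iff]
            intro hc
            obtain ⟨p, _, _, hp1⟩ := K4'.mp hc
            exact absurd ((Fchar p.1).mp hp1) (List.not_mem_nil)
          have hB : pvRelax edges tgt fb (m + 1) dist = fb := by
            simp [pvRelax, htgt, hch]
          rw [hB]
          simp [pvBfsA_nil]
      | f :: Ftl =>
          by_cases ht : tgt ∈ f :: Ftl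
          · -- target in the frontier: both sides return d
            have htgt : dist.get? tgt = some d := J2 tgt ht
            have hB : pvRelax edges tgt fb (m + 1) dist = d := by
              simp [pvRelax, htgt]
            rw [hB]
            have hk : n = (f :: Ftl).length + (n - (f :: Ftl).length) := by
              simp at hn ⊢; omega
            rw [show (List.map (fun v => (v, d)) (f :: Ftl)) =
                (List.map (fun v => (v, d)) (f :: Ftl)) ++ [] from (List.append_nil _).symm, hk]
            exact consumeFound adj tgt fb d (f :: Ftl) [] s _ ht
          · -- target not yet reached: do one level / one round
            have htgt : dist.get? tgt = none := by
              cases h : dist.get? tgt with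
              | none => rfl
              | some v =>
                  have : tgt ∈ s := (J1 tgt).mpr (by simp [h])
                  exact absurd (J5 this) ht
            have hB : pvRelax edges tgt fb (m + 1) dist =
                if (pvRound edges dist).2 then pvRelax edges tgt fb m (pvRound edges dist).1 else fb := by
              simp [pvRelax, htgt]
            have hk : n = (f :: Ftl).length + (n - (f :: Ftl).length) := by
              simp at hn ⊢; omega
            rw [show (List.map (fun v => (v, d)) (f :: Ftl)) =
                (List.map (fun v => (v, d)) (f :: Ftl)) ++ [] from (List.append_nil _).symm, hk,
              consume adj tgt fb d (f :: Ftl) [] s (n - (f :: Ftl).length) ht, hB]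
            simp only [List.nil_append]
            -- fresh nodes found this round = next frontier
            have hfresh : ∀ x, x ∈ (pvExpandB adj (s, []) (f :: Ftl)).2 ↔
                dist.get? x = none ∧ ∃ p ∈ pvDirs edges, p.2 = x ∧ dist.get? p.1 = some d := by
              intro x
              rw [mem_expand_snd]
              simp only [List.not_mem_nil, false_or]
              constructor
              · rintro ⟨⟨a, ha, hx⟩, hxs⟩
                refine ⟨?_, (a, x), (Hcorr a x).mp hx, rfl, (Fchar a).mpr ha⟩
                cases h : dist.get? x with
                | none => rfl
                | some v => exact absurd ((J1 x).mpr (by simp [h])) hxs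
              · rintro ⟨hxn, p, hp, rfl, hp1⟩
                refine ⟨⟨p.1, (Fchar p.1).mp hp1, (Hcorr p.1 p.2).mpr (by simpa using hp)⟩, ?_⟩
                intro hxs
                have h1 := (J1 p.2).mp hxs
                rw [hxn] at h1
                exact absurd h1 (by simp)
            have hval : ∀ x ∈ (pvExpandB adj (s, []) (f :: Ftl)).2,
                (pvRound edges dist).1.get? x = some (d + 1) := by
              intro x hx
              obtain ⟨hxn, hex⟩ := (hfresh x).mp hx
              exact (K2' x hxn).mpr hex
            have hnone : ∀ x, dist.get? x = none → x ∉ (pvExpandB adj (s, []) (f :: Ftl)).2 →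
                (pvRound edges dist).1.get? x = none := by
              intro x hxn hxF
              rcases K3 x hxn with h | h
              · exact h
              · obtain hex := (K2' x hxn).mp h
                exact absurd ((hfresh x).mpr ⟨hxn, hex⟩) hxF
            have hchanged : (pvRound edges dist).2 = true ↔
                ∃ x, x ∈ (pvExpandB adj (s, []) (f :: Ftl)).2 := by
              rw [K4']
              constructor
              · rintro ⟨p, hp, hpn, hp1⟩
                exact ⟨p.2, (hfresh p.2).mpr ⟨hpn, p, hp, rfl, hp1⟩⟩
              · rintro ⟨x, hx⟩
                obtain ⟨hxn, p, hp, rfl, hp1⟩ := (hfresh x).mp hx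
                exact ⟨p, hp, hxn, hp1⟩
            rcases hnf : (pvExpandB adj (s, []) (f :: Ftl)).2 with _ | ⟨x0, newFtl⟩
            · -- no new node: A's queue empties, B's round changed nothing
              have hch : (pvRound edges dist).2 = false := by
                rw [Bool.eq_false_iff]
                intro hc
                obtain ⟨x, hx⟩ := hchanged.mp hc
                rw [hnf] at hx
                cases hx
              rw [hch]
              simp [pvBfsA_nil]
            · -- new frontier nonempty: recurse one level deeper
              have hch : (pvRound edges dist).2 = true :=
                hchanged.mpr ⟨x0, by rw [hnf]; exact List.mem_cons_self⟩
              rw [hch]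
              simp only [if_true]
              have hInv' : pvInv edges tgt (pvExpandB adj (s, []) (f :: Ftl)).1
                  (x0 :: newFtl) (pvRound edges dist).1 (d + 1) := by
                rw [← hnf]
                refine ⟨?_, hval, ?_, ?_, ?_⟩
                · -- J1'
                  intro x
                  rw [mem_expand_fst]
                  cases hdx : dist.get? x with
                  | some i =>
                      rw [K1 x i hdx]
                      have : x ∈ s := (J1 x).mpr (by simp [hdx])
                      simp [this]
                  | none =>
                      have hxs : x ∉ s := fun hc => by
                        have h1 := (J1 x).mp hc; rw [hdx] at h1; exact absurd h1 (by simp)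
                      constructor
                      · rintro (h | ⟨a, ha, hx⟩)
                        · exact absurd h hxs
                        · have hxF : x ∈ (pvExpandB adj (s, []) (f :: Ftl)).2 :=
                            (hfresh x).mpr ⟨hdx, (a, x), (Hcorr a x).mp hx, rfl, (Fchar a).mpr ha⟩
                          rw [hval x hxF]
                          simp
                      · intro hs
                        by_cases hxF : x ∈ (pvExpandB adj (s, []) (f :: Ftl)).2
                        · obtain ⟨_, p, hp, hpx, hp1⟩ := (hfresh x).mp hxF
                          exact Or.inr ⟨p.1, (Fchar p.1).mp hp1,
                            (Hcorr p.1 x).mpr (by rw [← hpx]; simpa using hp)⟩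
                        · rw [hnone x hdx hxF] at hs
                          simp at hs
                · -- J3'
                  intro x hxs2 hxF
                  rw [mem_expand_fst] at hxs2
                  have hxmem : x ∈ s := by
                    rcases hxs2 with h | ⟨a, ha, hx⟩
                    · exact h
                    · by_contra hxs
                      exact hxF ((hfresh x).mpr ⟨by
                          cases h : dist.get? x with
                          | none => rfl
                          | some v => exact absurd ((J1 x).mpr (by simp [h])) hxs,
                        (a, x), (Hcorr a x).mp hx, rfl, (Fchar a).mpr ha⟩)
                  obtain ⟨i, hi⟩ : ∃ i, dist.get? x = some i := by
                    have h1 := (J1 x).mp hxmem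
                    cases h : dist.get? x with
                    | none => rw [h] at h1; simp at h1
                    | some v => exact ⟨v, rfl⟩
                  exact ⟨i, K1 x i hi, by have := Hle x i hi; omega⟩
                · -- J4'
                  intro p hp i hpi hlt
                  cases hdp1 : dist.get? p.1 with
                  | none =>
                      by_cases hpF : p.1 ∈ (pvExpandB adj (s, []) (f :: Ftl)).2
                      · rw [hval p.1 hpF] at hpi
                        injection hpi with hinj
                        omega
                      · rw [hnone p.1 hdp1 hpF] at hpi
                        cases hpi
                  | some i0 =>
                      rw [K1 p.1 i0 hdp1] at hpi
                      injection hpi with hinj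
                      subst hinj
                      by_cases hi : i0 < d
                      · obtain ⟨j, hj, hjle⟩ := J4 p hp i0 hdp1 hi
                        exact ⟨j, K1 p.2 j hj, hjle⟩
                      · have hid : i0 = d := le_antisymm (Hle p.1 i0 hdp1) (not_lt.mp hi)
                        cases hdp2 : dist.get? p.2 with
                        | some j =>
                            refine ⟨j, K1 p.2 j hdp2, ?_⟩
                            have := Hle p.2 j hdp2
                            omega
                        | none =>
                            have hpF : p.2 ∈ (pvExpandB adj (s, []) (f :: Ftl)).2 :=
                              (hfresh p.2).mpr ⟨hdp2, p, hp, rfl, hid ▸ hdp1⟩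
                            exact ⟨d + 1, hval p.2 hpF, by omega⟩
                · -- J5'
                  intro hts2
                  rw [mem_expand_fst] at hts2
                  rcases hts2 with h | ⟨a, ha, hx⟩
                  · exact absurd (J5 h) ht
                  · exact (hfresh tgt).mpr ⟨htgt, (a, tgt), (Hcorr a tgt).mp hx, rfl, (Fchar a).mpr ha⟩
              have hun := expandB_unseen U hnd adj hadj (f :: Ftl) s []
              rw [hnf] at hun
              have hm' : pvUnseen U (pvExpandB adj (s, []) (f :: Ftl)).1 < m := by
                simp at hun
                omega
              have hn' : (x0 :: newFtl).length + pvUnseen U (pvExpandB adj (s, []) (f :: Ftl)).1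
                  ≤ n - (f :: Ftl).length := by
                simp at hn hun ⊢
                omega
              exact ih (n - (f :: Ftl).length) (x0 :: newFtl) (pvExpandB adj (s, []) (f :: Ftl)).1
                (pvRound edges dist).1 (d + 1) hInv' hm' hn'

-- ---- gluing facts for the top-level instantiation ----

theorem mem_getD_flatten (adj : PySem.Dict (Option Int) (List (Option Int))) (k x : Option Int)
    (hx : x ∈ adj.getD k []) : x ∈ adj.values.flatten := by
  rw [PySem.Dict.getD_eq_get?_getD] at hx
  cases h : adj.get? k with
  | none => rw [h] at hx; simp at hx
  | some l =>
      rw [h] at hx; simp at hx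
      have hi := PySem.Dict.mem_items_of_get?_eq_some _ h
      refine List.mem_flatten.mpr ⟨l, ?_, hx⟩
      simp only [PySem.Dict.values]
      exact List.mem_map.mpr ⟨(k, l), hi, rfl⟩

theorem nodup_keys_adjA (sentence : List (List (String × Int))) :
    (pvAdjA sentence).keys.Nodup := by
  unfold pvAdjA
  have : ∀ (adj : PySem.Dict (Option Int) (List (Option Int))), adj.keys.Nodup →
      (sentence.foldl (fun adj token =>
        let tid := (PySem.Dict.mk token).get? "id"
        let head := (PySem.Dict.mk token).getD "head" 0
        if head ≠ 0 then
          let a1 := adj.insert tid (adj.getD tid [] ++ [some head])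
          a1.insert (some head) (a1.getD (some head) [] ++ [tid])
        else adj) adj).keys.Nodup := by
    induction sentence with
    | nil => intro adj h; exact h
    | cons t rest ih =>
        intro adj h
        simp only [List.foldl_cons]
        by_cases hh : (PySem.Dict.mk t).getD "head" 0 ≠ 0
        · simp only [if_pos hh]
          exact ih _ (PySem.Dict.nodup_keys_insert _ _ _ (PySem.Dict.nodup_keys_insert _ _ _ h))
        · simp only [if_neg hh]
          exact ih _ h
  exact this _ (by simp [PySem.Dict.keys])

theorem dedup_len_le_dirs (sentence : List (List (String × Int))) :
    (PySem.List.dedup (pvAdjA sentence).values.flatten).length ≤ 2 * (pvEdges sentence).length := by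
  have hnd : (PySem.List.dedup (pvAdjA sentence).values.flatten).Nodup := PySem.List.nodup_dedup _
  have hsub : PySem.List.dedup (pvAdjA sentence).values.flatten ⊆
      (pvDirs (pvEdges sentence)).map (·.2) := by
    intro x hx
    rw [PySem.List.mem_dedup _ x] at hx
    obtain ⟨l, hl, hxl⟩ := List.mem_flatten.mp hx
    simp only [PySem.Dict.values] at hl
    obtain ⟨⟨k, v⟩, hkv, hv⟩ := List.mem_map.mp hl
    have hget : (pvAdjA sentence).get? k = some v :=
      PySem.Dict.get?_of_mem_items _ hkv (nodup_keys_adjA sentence)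
    have hxk : x ∈ (pvAdjA sentence).getD k [] := by
      rw [PySem.Dict.getD_eq_get?_getD, hget]
      rw [← hv] at hxl
      simpa using hxl
    exact List.mem_map.mpr ⟨(k, x), (mem_adjA_iff sentence k x).mp hxk, rfl⟩
  have hle := List.Subperm.length_le (List.subperm_of_subset hnd hsub)
  rw [List.length_map, pvDirs_length] at hle
  exact hle

-- ===== VERDICT (by name: the statement is the Claim_ definition above) =====
theorem shortest_tree_distance_conllu_spec : Claim_equal_shortest_tree_distance_conllu := by
  intro sentence src_id tgt_id _
  unfold Spec_shortest_tree_distance_conllu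
  show shortest_tree_distance_conllu sentence src_id tgt_id =
    shortest_tree_distance_conllu_alt sentence src_id tgt_id
  unfold shortest_tree_distance_conllu shortest_tree_distance_conllu_alt
  have hget : ∀ x : Option Int,
      (PySem.Dict.mk [(some src_id, (0 : Int))]).get? x =
        if x = some src_id then some (0 : Int) else none := by
    intro x
    rw [PySem.Dict.get?_mk_cons]
    by_cases hx : x = some src_id
    · simp [hx]
    · have hbeq : ((some src_id : Option Int) == x) = false :=
        beq_eq_false_iff_ne.mpr (Ne.symm hx)
      simp [hbeq, PySem.Dict.get?, hx]
  have hInv : pvInv (pvEdges sentence) (some tgt_id) (PySem.Set.ofList [some src_id])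
      [some src_id] (PySem.Dict.mk [(some src_id, 0)]) 0 := by
    refine ⟨?_, ?_, ?_, ?_, ?_⟩
    · intro x
      rw [hget x]
      by_cases hx : x = some src_id <;> simp [hx, PySem.Set.mem_ofList]
    · intro x hx
      rcases List.mem_cons.mp hx with h | h
      · rw [hget x, if_pos h]
      · cases h
    · intro x hxs hxF
      rw [PySem.Set.mem_ofList] at hxs
      exact absurd hxs hxF
    · intro p hp i hpi hlt
      rw [hget p.1] at hpi
      by_cases h : p.1 = some src_id
      · rw [if_pos h] at hpi
        have : (0 : Int) = i := by injection hpi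
        omega
      · rw [if_neg h] at hpi
        cases hpi
    · intro h
      rwa [PySem.Set.mem_ofList] at h
  have hUn : pvUnseen (PySem.List.dedup (pvAdjA sentence).values.flatten)
      (PySem.Set.ofList [some src_id]) ≤
      (PySem.List.dedup (pvAdjA sentence).values.flatten).length := pvUnseen_le _ _
  have hU1 : (PySem.List.dedup (pvAdjA sentence).values.flatten).length ≤
      (pvAdjA sentence).values.flatten.length := by
    rw [PySem.List.dedup_eq_ofList]
    exact PySem.Set.length_ofList_le _
  have hU2 := dedup_len_le_dirs sentence
  have hm : pvUnseen (PySem.List.dedup (pvAdjA sentence).values.flatten)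
      (PySem.Set.ofList [some src_id]) < 2 * (pvEdges sentence).length + 2 := by omega
  have hn : ([some src_id] : List (Option Int)).length +
      pvUnseen (PySem.List.dedup (pvAdjA sentence).values.flatten)
        (PySem.Set.ofList [some src_id]) ≤ (pvAdjA sentence).values.flatten.length + 1 := by
    simp only [List.length_cons, List.length_nil]
    omega
  have hb := bridge (pvAdjA sentence) (pvEdges sentence) (some tgt_id)
    (max (sentence.length : Int) |src_id - tgt_id|)
    (PySem.List.dedup (pvAdjA sentence).values.flatten) (PySem.List.nodup_dedup _)
    (fun node nb hnb => (PySem.List.mem_dedup _ nb).mpr (mem_getD_flatten _ node nb hnb))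
    (mem_adjA_iff sentence)
    (2 * (pvEdges sentence).length + 2) ((pvAdjA sentence).values.flatten.length + 1)
    [some src_id] (PySem.Set.ofList [some src_id]) (PySem.Dict.mk [(some src_id, 0)]) 0
    hInv hm hn
  simpa using hb
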